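-- pv_equiv track=rewrite | github.com/TigerOnline/mech-interp-posttraining | interp-group-project/prism_survey_decoder.py | get_top_key
-- ===== SOURCE A (Python) =====
-- def get_top_key(d: dict, minimize: bool = False) -> str:
--     """Get the key with max value (or min if minimize=True)."""
--     if not d:
--         return None
--     # Filter out 'other' and 'other_text' keys
--     filtered = {k: v for k, v in d.items() if k not in ('other', 'other_text') and v is not None}
--     if not filtered:
--         return None
--     if minimize:
--         return min(filtered, key=lambda k: filtered[k])
--     return max(filtered, key=lambda k: filtered[k])
-- ===== SOURCE B (Python) =====
-- def get_top_key(d: dict, minimize: bool = False) -> str: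
--     best_key = None
--     best_val = None
--     for k, v in d.items():
--         if k in ('other', 'other_text') or v is None:
--             continue
--         if best_val is None or (v < best_val if minimize else v > best_val):
--             best_key, best_val = k, v
--     return best_key
-- ===== Notes on version B (the rewrite author's own statement) =====
-- stated objective: simpler
-- what changed: Replaced the build-a-filtered-dict-then-call-max/min-with-a-key-lambda pipeline by a single pass over d.items() maintaining best_key/best_val, with strict comparisons so the first-seen extreme wins ties exactly as max/min do.
import Mathlib
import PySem

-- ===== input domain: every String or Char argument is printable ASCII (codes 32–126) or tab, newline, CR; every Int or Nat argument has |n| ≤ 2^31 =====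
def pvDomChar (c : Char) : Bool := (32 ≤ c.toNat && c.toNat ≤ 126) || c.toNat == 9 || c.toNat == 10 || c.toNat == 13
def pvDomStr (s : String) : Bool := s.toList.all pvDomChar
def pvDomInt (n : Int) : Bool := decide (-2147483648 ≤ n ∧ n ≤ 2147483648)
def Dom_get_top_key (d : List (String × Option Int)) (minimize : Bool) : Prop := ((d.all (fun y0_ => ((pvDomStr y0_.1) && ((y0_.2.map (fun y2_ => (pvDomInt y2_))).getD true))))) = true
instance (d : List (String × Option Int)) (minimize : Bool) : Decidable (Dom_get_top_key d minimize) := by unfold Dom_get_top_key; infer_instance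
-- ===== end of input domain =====

-- B replaces the filtered-dict + max/min(key=...) pipeline by one pass keeping best_key/best_val (simpler decomposition, same O(n) cost).


-- ===== PORT A =====
-- the dict comprehension: keep pairs whose key is not 'other'/'other_text' and whose value is not None
def gtkFiltered (d : List (String × Option Int)) : List (String × Int) :=
  d.filterMap (fun kv =>
    if kv.1 != "other" && kv.1 != "other_text" then kv.2.map (fun v => (kv.1, v)) else none)

def get_top_key (d : List (String × Option Int)) (minimize : Bool) : Option String :=
  if d = [] then none
  else
    let filtered := gtkFiltered d
    if filtered = [] then none
    else if minimize then (PySem.List.min? filtered (fun kv => kv.2)).map (fun kv => kv.1)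
    else (PySem.List.max? filtered (fun kv => kv.2)).map (fun kv => kv.1)

-- ===== PORT B =====
-- one iteration of Source B's loop body over state (best_key, best_val)
def gtkStep (minimize : Bool) (st : Option String × Option Int) (kv : String × Option Int) :
    Option String × Option Int :=
  if kv.1 == "other" || kv.1 == "other_text" then st
  else
    match kv.2 with
    | none => st
    | some v =>
      match st.2 with
      | none => (some kv.1, some v)
      | some bv => if (if minimize then v < bv else bv < v) then (some kv.1, some v) else st

def get_top_key_alt (d : List (String × Option Int)) (minimize : Bool) : Option String :=
  (d.foldl (gtkStep minimize) ((none : Option String), (none : Option Int))).1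

-- ===== PRECONDITION & SPEC =====
def Spec_get_top_key (d : List (String × Option Int)) (minimize : Bool) (out : Option String) : Prop := out = get_top_key_alt d minimize
instance (d : List (String × Option Int)) (minimize : Bool) (out : Option String) : Decidable (Spec_get_top_key d minimize out) := by unfold Spec_get_top_key; infer_instance

-- ===== CLAIM (what is proved, stated in full; the proofs are below) =====
def Claim_equal_get_top_key : Prop := ∀ (d : List (String × Option Int)) (minimize : Bool), Dom_get_top_key d minimize → Spec_get_top_key d minimize (get_top_key d minimize)

-- ===== LEMMAS AND PROOFS =====
-- the selection step that both min? (minimize = true) and max? (minimize = false) perform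
def gtkSel (minimize : Bool) (acc : Option (String × Int)) (x : String × Int) : Option (String × Int) :=
  match acc with
  | none => some x
  | some m => if (if minimize then x.2 < m.2 else m.2 < x.2) then some x else some m

lemma min?_eq_sel (f : List (String × Int)) :
    PySem.List.min? f (fun kv => kv.2) = f.foldl (gtkSel true) none := by
  unfold PySem.List.min?
  congr 1
  funext acc x
  cases acc <;> simp [gtkSel]

lemma max?_eq_sel (f : List (String × Int)) :
    PySem.List.max? f (fun kv => kv.2) = f.foldl (gtkSel false) none := by
  unfold PySem.List.max?
  congr 1
  funext acc x
  cases acc <;> simp [gtkSel]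

-- B's loop over d computes (projections of) the selection fold over the filtered list
lemma loop_eq (minimize : Bool) (d : List (String × Option Int)) (acc : Option (String × Int)) :
    d.foldl (gtkStep minimize) (acc.map Prod.fst, acc.map Prod.snd) =
      (((gtkFiltered d).foldl (gtkSel minimize) acc).map Prod.fst,
       ((gtkFiltered d).foldl (gtkSel minimize) acc).map Prod.snd) := by
  induction d generalizing acc with
  | nil => simp [gtkFiltered]
  | cons kv t ih =>
    obtain ⟨k, ov⟩ := kv
    by_cases hk : (k == "other" || k == "other_text") = true
    · have hfil : gtkFiltered ((k, ov) :: t) = gtkFiltered t := by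
        simp only [gtkFiltered, List.filterMap_cons]
        simp only [Bool.or_eq_true, beq_iff_eq] at hk
        rcases hk with hk | hk <;> simp [hk]
      have hstep : gtkStep minimize (acc.map Prod.fst, acc.map Prod.snd) (k, ov)
          = (acc.map Prod.fst, acc.map Prod.snd) := by
        simp [gtkStep, hk]
      rw [List.foldl_cons, hstep, hfil, ih]
    · have hk1 : k ≠ "other" := by
        simp only [Bool.or_eq_true, beq_iff_eq] at hk; tauto
      have hk2 : k ≠ "other_text" := by
        simp only [Bool.or_eq_true, beq_iff_eq] at hk; tauto
      cases ov with
      | none =>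
        have hfil : gtkFiltered ((k, none) :: t) = gtkFiltered t := by
          simp [gtkFiltered, List.filterMap_cons, hk1, hk2]
        have hstep : gtkStep minimize (acc.map Prod.fst, acc.map Prod.snd) (k, none)
            = (acc.map Prod.fst, acc.map Prod.snd) := by
          simp [gtkStep, hk]
        rw [List.foldl_cons, hstep, hfil, ih]
      | some v =>
        have hfil : gtkFiltered ((k, some v) :: t) = (k, v) :: gtkFiltered t := by
          simp [gtkFiltered, List.filterMap_cons, hk1, hk2]
        rw [List.foldl_cons, hfil, List.foldl_cons]
        cases acc with
        | none =>
          have hstep : gtkStep minimize ((none : Option (String × Int)).map Prod.fst,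
              (none : Option (String × Int)).map Prod.snd) (k, some v)
              = ((some (k, v)).map Prod.fst, (some (k, v)).map Prod.snd) := by
            simp [gtkStep, hk]
          rw [hstep, ih]
          simp [gtkSel]
        | some m =>
          obtain ⟨bk, bv⟩ := m
          by_cases hc : (if minimize then v < bv else bv < v)
          · have hstep : gtkStep minimize ((some ((bk, bv) : String × Int)).map Prod.fst,
                (some ((bk, bv) : String × Int)).map Prod.snd) (k, some v)
                = ((some (k, v)).map Prod.fst, (some (k, v)).map Prod.snd) := by
              simp [gtkStep, hk, hc]
            rw [hstep, ih]
            simp [gtkSel, hc]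
          · have hstep : gtkStep minimize ((some ((bk, bv) : String × Int)).map Prod.fst,
                (some ((bk, bv) : String × Int)).map Prod.snd) (k, some v)
                = ((some ((bk, bv) : String × Int)).map Prod.fst,
                   (some ((bk, bv) : String × Int)).map Prod.snd) := by
              simp [gtkStep, hk, hc]
            rw [hstep, ih]
            simp [gtkSel, hc]

lemma alt_eq (d : List (String × Option Int)) (minimize : Bool) :
    get_top_key_alt d minimize =
      (((gtkFiltered d).foldl (gtkSel minimize) none).map Prod.fst) := by
  unfold get_top_key_alt
  have h := loop_eq minimize d none
  simp only [Option.map_none] at h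
  rw [h]

-- ===== VERDICT (by name: the statement is the Claim_ definition above) =====
theorem get_top_key_spec : Claim_equal_get_top_key := by
  intro d minimize _
  unfold Spec_get_top_key
  rw [alt_eq]
  unfold get_top_key
  by_cases hd : d = []
  · subst hd; simp [gtkFiltered]
  · simp only [hd, if_false]
    by_cases hf : gtkFiltered d = []
    · simp [hf]
    · simp only [hf, if_false]
      cases minimize
      · simp [max?_eq_sel]
      · simp [min?_eq_sel]
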